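-- pv_equiv track=rewrite | github.com/RazanAlsulaymi/EACH-AGENTIC-AI | EACH/scripts/backfill_plans_from_sessions.py | sanitize_plan_content
-- ===== SOURCE A (Python) =====
-- def sanitize_plan_content(plan_text: str) -> str:
--     if not plan_text or not isinstance(plan_text, str):
--         return ""
--     text = plan_text.strip()
--     for marker in ["REFLECTION_PASSED", "EVAL_SCORE", "EVALUATION SUMMARY", "REFLECTION SUMMARY"]:
--         idx = text.upper().find(marker.upper())
--         if idx >= 0:
--             text = text[:idx].rstrip()
--     return text
-- ===== SOURCE B (Python) =====
-- def sanitize_plan_content(plan_text: str) -> str: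
--     if not plan_text or not isinstance(plan_text, str):
--         return ""
--     text = plan_text.strip()
--     up = text.upper()
--     hits = [i for i in (up.find(marker) for marker in
--             ["REFLECTION_PASSED", "EVAL_SCORE", "EVALUATION SUMMARY", "REFLECTION SUMMARY"])
--             if i >= 0]
--     if hits:
--         text = text[:min(hits)].rstrip()
--     return text
-- ===== Notes on version B (the rewrite author's own statement) =====
-- stated objective: simpler
-- what changed: A makes four sequential cut-and-rescan passes (re-uppercasing and re-searching the already-truncated text after every cut); B uppercases the stripped text once, collects the find() index of each marker in that one string, and performs a single cut at the minimum hit index.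
-- outside the precondition, e.g. on sanitize_plan_content('xEVAL_SCOREFLECTION_PASSEDy'): A returns 'xEVAL_SCO', B returns 'x'
import Mathlib
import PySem

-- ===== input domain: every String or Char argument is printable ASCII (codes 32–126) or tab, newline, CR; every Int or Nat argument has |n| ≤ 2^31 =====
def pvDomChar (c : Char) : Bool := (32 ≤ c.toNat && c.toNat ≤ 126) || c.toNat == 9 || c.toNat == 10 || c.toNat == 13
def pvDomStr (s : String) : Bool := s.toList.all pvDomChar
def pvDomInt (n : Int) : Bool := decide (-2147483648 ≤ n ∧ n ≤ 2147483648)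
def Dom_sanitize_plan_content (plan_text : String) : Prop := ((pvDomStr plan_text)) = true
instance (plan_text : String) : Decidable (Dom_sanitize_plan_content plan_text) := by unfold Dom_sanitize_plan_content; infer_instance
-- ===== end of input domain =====

-- B replaces A's four sequential cut-and-rescan passes by one cut at the minimum marker index
-- found in the once-uppercased text (objective: simpler).

-- ===== PORT A =====
-- loop body of A's 'for marker in [...]' (named helper; the same steps as A's loop body)
def aStep (text marker : String) : String :=
  let idx := PySem.Str.find (PySem.Str.upper text) (PySem.Str.upper marker)
  if 0 ≤ idx then PySem.Str.rstrip (PySem.Str.slice text none (some idx)) else text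

def sanitize_plan_content (plan_text : String) : String :=
  if plan_text = "" then ""
  else
    ["REFLECTION_PASSED", "EVAL_SCORE", "EVALUATION SUMMARY", "REFLECTION SUMMARY"].foldl
      aStep (PySem.Str.strip plan_text)

-- ===== PORT B =====
def sanitize_plan_content_alt (plan_text : String) : String :=
  if plan_text = "" then ""
  else
    let text := PySem.Str.strip plan_text
    let up := PySem.Str.upper text
    let hits := (["REFLECTION_PASSED", "EVAL_SCORE", "EVALUATION SUMMARY", "REFLECTION SUMMARY"].map
        (fun marker => PySem.Str.find up marker)).filter (fun i => decide (0 ≤ i))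
    match PySem.List.min? hits (fun i => i) with
    | some mn => PySem.Str.rstrip (PySem.Str.slice text none (some mn))
    | none => text

-- ===== PRECONDITION & SPEC =====
-- Pre_ excludes texts whose stripped, uppercased content contains "EVAL_SCOREFLECTION_PASSED":
-- there an EVAL_SCORE hit overlaps a REFLECTION_PASSED hit, and which of the two overlapping
-- markers wins the truncation is a corner neither reading specifies (A cuts at the later
-- REFLECTION_PASSED hit first and then no longer sees EVAL_SCORE; B cuts at the earliest hit).
def Pre_sanitize_plan_content (plan_text : String) : Prop :=
  PySem.Str.isIn "EVAL_SCOREFLECTION_PASSED" (PySem.Str.upper (PySem.Str.strip plan_text)) = false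
instance (plan_text : String) : Decidable (Pre_sanitize_plan_content plan_text) := by
  unfold Pre_sanitize_plan_content; infer_instance

def pvWitness_sanitize_plan_content : String := "  do the plan\nEVAL_SCORE: 7"

def Spec_sanitize_plan_content (plan_text : String) (out : String) : Prop :=
  out = sanitize_plan_content_alt plan_text
instance (plan_text : String) (out : String) : Decidable (Spec_sanitize_plan_content plan_text out) := by
  unfold Spec_sanitize_plan_content; infer_instance

-- ===== CLAIM (what is proved, stated in full; the proofs are below) =====
def Claim_equal_sanitize_plan_content : Prop := ∀ (plan_text : String), Dom_sanitize_plan_content plan_text → Pre_sanitize_plan_content plan_text → Spec_sanitize_plan_content plan_text (sanitize_plan_content plan_text)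

-- ===== LEMMAS AND PROOFS =====

-- the marker list (proof-side shorthand for the literal list both ports write out)
def pvM : List String := ["REFLECTION_PASSED", "EVAL_SCORE", "EVALUATION SUMMARY", "REFLECTION SUMMARY"]
-- the ordered pairs (marker K, marker M) with M processed BEFORE K by A's loop
def pvPairs : List (String × String) :=
  [("EVAL_SCORE", "REFLECTION_PASSED"),
   ("EVALUATION SUMMARY", "REFLECTION_PASSED"), ("EVALUATION SUMMARY", "EVAL_SCORE"),
   ("REFLECTION SUMMARY", "REFLECTION_PASSED"), ("REFLECTION SUMMARY", "EVAL_SCORE"),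
   ("REFLECTION SUMMARY", "EVALUATION SUMMARY")]

lemma upper_self : ∀ M ∈ pvM, PySem.Str.upper M = M := by decide

lemma marker_ne_nil : ∀ M ∈ pvM, M.toList ≠ [] := by decide

lemma rstrip_prefix (l : List Char) : PySem.Chars.rstrip l <+: l := by
  unfold PySem.Chars.rstrip
  have h := List.dropWhile_suffix (l := l.reverse) PySem.Chars.isspace
  have h2 := List.reverse_prefix.mpr h
  simpa using h2

lemma rstrip_append_nonspace (x y : List Char) (c : Char) (hc : PySem.Chars.isspace c = false) :
    PySem.Chars.rstrip (x ++ c :: y) = x ++ c :: PySem.Chars.rstrip y := by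
  unfold PySem.Chars.rstrip
  have h1 : (x ++ c :: y).reverse = (y.reverse ++ [c]) ++ x.reverse := by simp
  have hmid : List.dropWhile PySem.Chars.isspace (y.reverse ++ [c])
      = List.dropWhile PySem.Chars.isspace y.reverse ++ [c] := by
    rw [List.dropWhile_append]
    split_ifs with h2
    · rw [List.isEmpty_iff] at h2
      simp [h2, hc]
    · rfl
  have hne : (List.dropWhile PySem.Chars.isspace (y.reverse ++ [c])).isEmpty = false := by
    rw [hmid]; simp
  rw [h1, List.dropWhile_append, hne]
  simp [hmid]

lemma rstrip_take_ex (s : List Char) (idx p : Nat) (hp : p < idx)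
    (hpl : p < s.length) (hns : PySem.Chars.isspace s[p] = false) :
    ∃ ℓ, PySem.Chars.rstrip (s.take idx) = s.take ℓ ∧ p < ℓ ∧ ℓ ≤ idx := by
  set y := (s.take idx).drop (p + 1) with hy
  have h0 : (s.take idx).take (p + 1) = s.take (p + 1) := by
    rw [List.take_take]; congr 1; omega
  have h1 : s.take idx = (s.take p ++ [s[p]]) ++ y := by
    conv_lhs => rw [← List.take_append_drop (p + 1) (s.take idx)]
    rw [h0, ← List.take_succ_eq_append_getElem hpl]
  have h2 : PySem.Chars.rstrip (s.take idx) = s.take p ++ s[p] :: PySem.Chars.rstrip y := by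
    rw [h1, List.append_assoc, List.singleton_append, rstrip_append_nonspace _ _ _ hns]
  have hpr : s.take p ++ s[p] :: PySem.Chars.rstrip y <+: s.take idx := by
    conv_rhs => rw [h1]
    rw [List.append_assoc, List.singleton_append]
    exact (List.prefix_append_right_inj _).mpr (List.cons_prefix_cons.mpr ⟨rfl, rstrip_prefix y⟩)
  have hS : s.take p ++ s[p] :: PySem.Chars.rstrip y <+: s := hpr.trans (List.take_prefix _ _)
  have hlen : (s.take p ++ s[p] :: PySem.Chars.rstrip y).length
      = p + 1 + (PySem.Chars.rstrip y).length := by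
    simp [List.length_append, List.length_take]
    omega
  refine ⟨p + 1 + (PySem.Chars.rstrip y).length, ?_, by omega, ?_⟩
  · rw [h2, List.prefix_iff_eq_take.mp hS, hlen]
  · have h3 := hpr.length_le
    rw [hlen] at h3
    simp [List.length_take] at h3
    omega

lemma isspace_of_upper (c : Char)
    (h : PySem.Chars.upperChar c = 'D' ∨ PySem.Chars.upperChar c = 'E' ∨ PySem.Chars.upperChar c = 'Y') :
    PySem.Chars.isspace c = false := by
  by_cases hl : PySem.Chars.islower c = true
  · have hb : 97 ≤ c.toNat ∧ c.toNat ≤ 122 := by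
      unfold PySem.Chars.islower at hl
      simp only [Bool.and_eq_true, decide_eq_true_eq, Char.le_def, UInt32.le_iff_toNat_le] at hl
      exact hl
    have key : ∀ n : Nat, 97 ≤ n → n ≤ 122 → (decide (n = 32) || decide (9 ≤ n) && decide (n ≤ 13) || decide (28 ≤ n) && decide (n ≤ 31) || decide (n = 133) || decide (n = 160) || decide (n = 5760) || decide (8192 ≤ n) && decide (n ≤ 8202) || decide (n = 8232) || decide (n = 8233) || decide (n = 8239) || decide (n = 8287) || decide (n = 12288)) = false := by
      intro n h1 h2
      simp only [Bool.or_eq_false_iff, Bool.and_eq_false_iff, decide_eq_false_iff_not]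
      omega
    exact key c.toNat hb.1 hb.2
  · unfold PySem.Chars.upperChar at h
    simp only [hl, if_neg, Bool.false_eq_true, not_false_eq_true] at h
    rcases h with h | h | h <;> subst h <;> decide

lemma upper_take (s : List Char) (n : Nat) :
    PySem.Chars.upper (s.take n) = (PySem.Chars.upper s).take n := by
  simp [PySem.Chars.upper, List.map_take]

lemma length_upper (s : List Char) : (PySem.Chars.upper s).length = s.length := by
  simp [PySem.Chars.upper]

lemma find_le_of_occ (u M : List Char) (j : Nat) (h : M <+: u.drop j) :
    0 ≤ PySem.Chars.find u M ∧ (PySem.Chars.find u M).toNat ≤ j := by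
  have hin : PySem.Chars.isIn M u = true := (PySem.Chars.exists_prefix_drop_iff_isIn M u).mp ⟨j, h⟩
  have h0 : 0 ≤ PySem.Chars.find u M := by
    rw [PySem.Chars.find_nonneg_iff]
    exact (PySem.Chars.isIn_iff_infix M u).mp hin
  obtain ⟨-, hmin⟩ := PySem.Chars.find_spec h0
  refine ⟨h0, ?_⟩
  by_contra hc
  exact hmin j (by omega) h

lemma occ_of_occ_take (u M : List Char) (n j : Nat) (h : M <+: (u.take n).drop j) :
    M <+: u.drop j := by
  rw [List.drop_take] at h
  exact h.trans (List.take_prefix _ _)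

lemma occ_into_take (u M : List Char) (n j : Nat) (h : M <+: u.drop j)
    (hn : j + M.length ≤ n) : M <+: (u.take n).drop j := by
  rw [List.drop_take]
  exact List.prefix_take_iff.mpr ⟨h, by omega⟩

lemma occ_bound (u M : List Char) (j : Nat) (hM : M ≠ []) (h : M <+: u.drop j) :
    j + M.length ≤ u.length := by
  have h1 := h.length_le
  rw [List.length_drop] at h1
  have h2 : 0 < M.length := List.length_pos_iff.mpr hM
  omega

lemma marker_no_overlap (K M : String) (hpair : (K, M) ∈ pvPairs) (d : Nat) (hd18 : d < 18)
    (hd1 : 1 ≤ d) (hdK : d < K.toList.length)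
    (hrel : M.toList <+: K.toList.drop d ∨ K.toList.drop d <+: M.toList) :
    K = "EVAL_SCORE" ∧ M = "REFLECTION_PASSED" ∧ d = 8 := by
  have hrel' : (M.toList.isPrefixOf (K.toList.drop d) || (K.toList.drop d).isPrefixOf M.toList) = true := by
    rcases hrel with h | h
    · simp [List.isPrefixOf_iff_prefix, h]
    · simp [List.isPrefixOf_iff_prefix, h]
  clear hrel
  fin_cases hpair <;>
    · interval_cases d <;> revert hrel' <;> revert hdK <;> decide

lemma overlap_bad (u : List Char) (K M : String) (hpair : (K, M) ∈ pvPairs) (q p : Nat)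
    (hocc1 : K.toList <+: u.drop q) (hocc2 : M.toList <+: u.drop p)
    (h1 : q < p) (h2 : p < q + K.toList.length) :
    "EVAL_SCOREFLECTION_PASSED".toList <:+: u := by
  obtain ⟨d, rfl⟩ : ∃ d, p = q + d := ⟨p - q, by omega⟩
  obtain ⟨r1, hr1⟩ := hocc1
  have hdrop : u.drop (q + d) = K.toList.drop d ++ r1 := by
    have h3 : u.drop (q + d) = (u.drop q).drop d := by rw [List.drop_drop, Nat.add_comm]
    rw [h3, ← hr1, List.drop_append_of_le_length (by omega)]
  rw [hdrop] at hocc2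
  have hrel : M.toList <+: K.toList.drop d ∨ K.toList.drop d <+: M.toList := by
    by_cases hlen : M.toList.length ≤ (K.toList.drop d).length
    · exact Or.inl (List.prefix_of_prefix_length_le hocc2 (List.prefix_append _ _) hlen)
    · exact Or.inr (List.prefix_of_prefix_length_le (List.prefix_append _ _) hocc2 (by omega))
  have hK18 : K.toList.length ≤ 18 := by fin_cases hpair <;> decide
  obtain ⟨hKe, hMe, hde⟩ := marker_no_overlap K M hpair d (by omega) (by omega) (by omega) hrel
  subst hKe; subst hMe; subst hde
  rcases hocc2 with ⟨r2, hr2⟩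
  refine ⟨u.take q, r2, ?_⟩
  have hBAD : "EVAL_SCOREFLECTION_PASSED".toList
      = "EVAL_SCORE".toList.take 8 ++ "REFLECTION_PASSED".toList := by decide
  rw [hBAD]
  calc u.take q ++ ("EVAL_SCORE".toList.take 8 ++ "REFLECTION_PASSED".toList) ++ r2
      = u.take q ++ ("EVAL_SCORE".toList.take 8 ++ ("REFLECTION_PASSED".toList ++ r2)) := by
        simp [List.append_assoc]
    _ = u.take q ++ ("EVAL_SCORE".toList.take 8 ++ ("EVAL_SCORE".toList.drop 8 ++ r1)) := by
        rw [hr2]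
    _ = u.take q ++ ("EVAL_SCORE".toList ++ r1) := by congr 1
    _ = u.take q ++ u.drop q := by rw [hr1]
    _ = u := List.take_append_drop q u

lemma last_DEY : ∀ M ∈ pvM, ∀ (h : M.toList.length - 1 < M.toList.length),
    M.toList[M.toList.length - 1]'h = 'D' ∨ M.toList[M.toList.length - 1]'h = 'E' ∨
      M.toList[M.toList.length - 1]'h = 'Y' := by
  decide

lemma aStep_toList (t marker : String) (hM : PySem.Str.upper marker = marker) :
    (aStep t marker).toList =
      if 0 ≤ PySem.Chars.find (PySem.Chars.upper t.toList) marker.toList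
      then PySem.Chars.rstrip (t.toList.take
        (PySem.Chars.find (PySem.Chars.upper t.toList) marker.toList).toNat)
      else t.toList := by
  unfold aStep
  simp only [hM, PySem.Str.find_eq, PySem.Str.toList_upper]
  split_ifs with h
  · simp only [PySem.Str.toList_rstrip, PySem.Str.toList_slice, PySem.Chars.slice_eq_listSlice,
      PySem.List.slice_to _ h]
  · rfl

lemma aStep_neg (t marker : String) (hM : PySem.Str.upper marker = marker)
    (h : ¬ 0 ≤ PySem.Chars.find (PySem.Chars.upper t.toList) marker.toList) :
    aStep t marker = t := by
  unfold aStep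
  simp only [hM, PySem.Str.find_eq, PySem.Str.toList_upper]
  rw [if_neg h]

-- one loop step of A from the "alive" state: either the minimal hit at mstar is still intact,
-- or the step cut exactly at mstar
lemma stepAlive (s : List Char)
    (hPre : ¬ ("EVAL_SCOREFLECTION_PASSED".toList <:+: PySem.Chars.upper s))
    (mk M : String) (hM : M ∈ pvM) (hpair : (mk, M) ∈ pvPairs) (mstar : Nat)
    (hKocc : mk.toList <+: (PySem.Chars.upper s).drop mstar)
    (hmkne : mk.toList ≠ [])
    (hmin : ∀ N ∈ pvM, ∀ j : Nat, N.toList <+: (PySem.Chars.upper s).drop j → mstar ≤ j)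
    (t : String) (n : Nat) (ht : t.toList = s.take n)
    (hbn : mstar + mk.toList.length ≤ n) (hn : n ≤ s.length) :
    (∃ n', (aStep t M).toList = s.take n' ∧ mstar + mk.toList.length ≤ n' ∧ n' ≤ s.length)
      ∨ (aStep t M).toList = PySem.Chars.rstrip (s.take mstar) := by
  set u := PySem.Chars.upper s with hu
  have hul : u.length = s.length := length_upper s
  have hmk1 : 0 < mk.toList.length := List.length_pos_iff.mpr hmkne
  rw [aStep_toList t M (upper_self M hM), ht, upper_take, ← hu]
  by_cases hF0 : 0 ≤ PySem.Chars.find (u.take n) M.toList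
  case neg =>
    rw [if_neg hF0]
    exact Or.inl ⟨n, rfl, hbn, hn⟩
  rw [if_pos hF0]
  set idx := (PySem.Chars.find (u.take n) M.toList).toNat with hidxdef
  obtain ⟨hFocc, -⟩ := PySem.Chars.find_spec hF0
  have hMocc : M.toList <+: u.drop idx := occ_of_occ_take u M.toList n _ hFocc
  have hidxge : mstar ≤ idx := hmin M hM idx hMocc
  have hidxle : idx + M.toList.length ≤ n := by
    have hlb := hFocc.length_le
    rw [List.length_drop, List.length_take] at hlb
    have hM1 : 0 < M.toList.length := List.length_pos_iff.mpr (marker_ne_nil M hM)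
    omega
  have htt : (s.take n).take idx = s.take idx := by
    rw [List.take_take, Nat.min_eq_left (by omega)]
  by_cases hidx : idx = mstar
  · right
    rw [htt, hidx]
  · have hlt : mstar < idx := lt_of_le_of_ne hidxge (Ne.symm hidx)
    have hge : mstar + mk.toList.length ≤ idx := by
      by_contra hcon
      exact hPre (overlap_bad u mk M hpair mstar idx hKocc hMocc hlt (by omega))
    set p := mstar + mk.toList.length - 1 with hp
    have hplt : p < idx := by omega
    have hpl : p < s.length := by omega
    have hpu : p < u.length := by omega
    have hns : PySem.Chars.isspace s[p] = false := by
      have hdl : mk.toList.length - 1 < (u.drop mstar).length := by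
        rw [List.length_drop]; omega
      have h1 : mk.toList[mk.toList.length - 1]'(by omega) = (u.drop mstar)[mk.toList.length - 1]'hdl :=
        hKocc.getElem (by omega)
      have h2 : (u.drop mstar)[mk.toList.length - 1]'hdl = u[p]'hpu := by
        rw [List.getElem_drop]
        congr 1
        omega
      have h3 : u[p]'hpu = PySem.Chars.upperChar s[p] := by
        simp [hu, PySem.Chars.upper]
      have h4 := last_DEY mk ?memb (by omega)
      case memb =>
        have := hpair
        fin_cases this <;> decide
      rw [h1, h2, h3] at h4
      exact isspace_of_upper _ h4
    obtain ⟨ℓ, heq, hpℓ, hℓidx⟩ := rstrip_take_ex s idx p hplt hpl hns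
    left
    exact ⟨ℓ, by rw [htt, heq], by omega, by omega⟩

-- A's loop step at the minimal marker itself cuts exactly at mstar
lemma stepK (s : List Char) (mk : String) (hmk : mk ∈ pvM) (mstar : Nat)
    (hKocc : mk.toList <+: (PySem.Chars.upper s).drop mstar)
    (hmin : ∀ N ∈ pvM, ∀ j : Nat, N.toList <+: (PySem.Chars.upper s).drop j → mstar ≤ j)
    (t : String) (n : Nat) (ht : t.toList = s.take n)
    (hbn : mstar + mk.toList.length ≤ n) (_hn : n ≤ s.length) :
    (aStep t mk).toList = PySem.Chars.rstrip (s.take mstar) := by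
  set u := PySem.Chars.upper s with hu
  have hul : u.length = s.length := length_upper s
  rw [aStep_toList t mk (upper_self mk hmk), ht, upper_take]
  rw [← hu]
  have hocc_take : mk.toList <+: (u.take n).drop mstar :=
    occ_into_take u mk.toList n mstar hKocc hbn
  obtain ⟨hF0, hFle⟩ := find_le_of_occ (u.take n) mk.toList mstar hocc_take
  obtain ⟨hFocc, -⟩ := PySem.Chars.find_spec hF0
  have hFocc' := occ_of_occ_take u mk.toList n _ hFocc
  have hFge : mstar ≤ (PySem.Chars.find (u.take n) mk.toList).toNat :=
    hmin mk hmk _ hFocc'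
  have hFeq : (PySem.Chars.find (u.take n) mk.toList).toNat = mstar := by omega
  rw [if_pos hF0, hFeq, List.take_take, Nat.min_eq_left (by omega)]

-- once the cut at mstar happened, every further loop step of A is a no-op
lemma stepGood (s : List Char) (M : String) (hM : M ∈ pvM) (mstar : Nat)
    (hms : mstar ≤ s.length)
    (hmin : ∀ N ∈ pvM, ∀ j : Nat, N.toList <+: (PySem.Chars.upper s).drop j → mstar ≤ j)
    (t : String) (ht : t.toList = PySem.Chars.rstrip (s.take mstar)) :
    (aStep t M).toList = PySem.Chars.rstrip (s.take mstar) := by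
  set u := PySem.Chars.upper s with hu
  have hul : u.length = s.length := length_upper s
  have hpre : PySem.Chars.rstrip (s.take mstar) <+: s :=
    (rstrip_prefix _).trans (List.take_prefix _ _)
  have hlen_le : (PySem.Chars.rstrip (s.take mstar)).length ≤ mstar := by
    have := (rstrip_prefix (s.take mstar)).length_le
    simp [List.length_take] at this
    omega
  set ℓ := (PySem.Chars.rstrip (s.take mstar)).length with hℓ
  have htake : PySem.Chars.rstrip (s.take mstar) = s.take ℓ := List.prefix_iff_eq_take.mp hpre
  have hMne := marker_ne_nil M hM
  rw [aStep_toList t M (upper_self M hM), ht, htake, upper_take, ← hu]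
  have hneg : ¬ 0 ≤ PySem.Chars.find (u.take ℓ) M.toList := by
    intro hF0
    obtain ⟨hFocc, -⟩ := PySem.Chars.find_spec hF0
    have hFocc' := occ_of_occ_take u M.toList ℓ _ hFocc
    have hge : mstar ≤ (PySem.Chars.find (u.take ℓ) M.toList).toNat := hmin M hM _ hFocc'
    have hlb := hFocc.length_le
    have hM1 : 0 < M.toList.length := List.length_pos_iff.mpr hMne
    rw [List.length_drop, List.length_take] at hlb
    omega
  rw [if_neg hneg]

lemma hits_eq (plan_text : String) :
    (List.filter (fun i => decide (0 ≤ i))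
      (List.map (fun marker => PySem.Str.find (PySem.Str.upper (PySem.Str.strip plan_text)) marker) pvM))
    = (List.filter (fun i => decide (0 ≤ i))
        (List.map (fun marker => PySem.Chars.find (PySem.Chars.upper (PySem.Str.strip plan_text).toList) marker.toList) pvM)) := by
  simp only [PySem.Str.find_eq, PySem.Str.toList_upper]

-- ===== VERDICT (by name: the statement is the Claim_ definition above) =====
set_option maxHeartbeats 1000000 in
theorem sanitize_plan_content_spec : Claim_equal_sanitize_plan_content := by
  intro plan_text hDom hPre
  unfold Spec_sanitize_plan_content
  by_cases hemp : plan_text = ""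
  · simp [sanitize_plan_content, sanitize_plan_content_alt, hemp]
  · simp only [sanitize_plan_content, sanitize_plan_content_alt, if_neg hemp]
    have hlit : (["REFLECTION_PASSED", "EVAL_SCORE", "EVALUATION SUMMARY", "REFLECTION SUMMARY"] : List String) = pvM := rfl
    rw [hlit, hits_eq plan_text]
    set text0 := PySem.Str.strip plan_text with htext0
    set s : List Char := text0.toList with hs
    set u := PySem.Chars.upper s with hu
    have hul : u.length = s.length := length_upper s
    have hPre' : ¬ ("EVAL_SCOREFLECTION_PASSED".toList <:+: u) := by
      intro hinf
      unfold Pre_sanitize_plan_content at hPre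
      have h2 : PySem.Str.isIn "EVAL_SCOREFLECTION_PASSED" (PySem.Str.upper text0) = true := by
        rw [PySem.Str.isIn_iff_infix, PySem.Str.toList_upper]
        exact hinf
      rw [hPre] at h2
      exact Bool.false_ne_true h2
    set hits := List.filter (fun i => decide (0 ≤ i))
        (List.map (fun marker => PySem.Chars.find u marker.toList) pvM) with hhits
    rcases hmn : PySem.List.min? hits (fun i => i) with _ | m
    · -- no marker occurs: every find is negative, A's loop never cuts
      have hnil := (PySem.List.min?_eq_none_iff hits (fun i => i)).mp hmn
      rw [hhits, List.filter_eq_nil_iff] at hnil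
      have hneg : ∀ N ∈ pvM, ¬ 0 ≤ PySem.Chars.find u N.toList := by
        intro N hN h0
        have h2 := hnil _ (List.mem_map.mpr ⟨N, hN, rfl⟩)
        rw [decide_eq_true_eq] at h2
        exact h2 h0
      have ht0 : text0.toList = s := rfl
      have step : ∀ N ∈ pvM, aStep text0 N = text0 := by
        intro N hN
        refine aStep_neg text0 N (upper_self N hN) ?_
        rw [ht0, ← hu]
        exact hneg N hN
      show List.foldl aStep text0 pvM = text0
      simp only [pvM, List.foldl_cons, List.foldl_nil]
      rw [step _ (by decide), step _ (by decide), step _ (by decide), step _ (by decide)]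
    · -- some marker occurs: m is the least hit index
      have hmmem := PySem.List.min?_mem hmn
      rw [hhits] at hmmem
      obtain ⟨hmem, hpos⟩ := List.mem_filter.mp hmmem
      obtain ⟨mk, hmk, hmkfind⟩ := List.mem_map.mp hmem
      have hm0 : (0 : Int) ≤ m := by simpa using hpos
      set mstar := m.toNat with hmstar
      have hmcast : (mstar : Int) = m := Int.toNat_of_nonneg hm0
      have hKfind : PySem.Chars.find u mk.toList = (mstar : Int) := by rw [hmcast, hmkfind]
      have hKocc : mk.toList <+: u.drop mstar := by
        have h0 : 0 ≤ PySem.Chars.find u mk.toList := by rw [hKfind]; exact_mod_cast Int.natCast_nonneg mstar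
        have := (PySem.Chars.find_spec h0).1
        rwa [hKfind, Int.toNat_natCast] at this
      have hmin : ∀ N ∈ pvM, ∀ j : Nat, N.toList <+: u.drop j → mstar ≤ j := by
        intro N hN j hocc
        obtain ⟨h0, hle⟩ := find_le_of_occ u N.toList j hocc
        have hmemN : PySem.Chars.find u N.toList ∈ hits := by
          rw [hhits]
          exact List.mem_filter.mpr ⟨List.mem_map.mpr ⟨N, hN, rfl⟩, by simpa using h0⟩
        have hml := PySem.List.min?_isMin hmn _ hmemN
        have : m.toNat ≤ (PySem.Chars.find u N.toList).toNat := Int.toNat_le_toNat hml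
        omega
      have hmkne := marker_ne_nil mk hmk
      have hbound : mstar + mk.toList.length ≤ s.length := by
        have := occ_bound u mk.toList mstar hmkne hKocc
        omega
      -- B's value
      have hBval : (PySem.Str.rstrip (PySem.Str.slice text0 none (some m))).toList
          = PySem.Chars.rstrip (s.take mstar) := by
        rw [PySem.Str.toList_rstrip, PySem.Str.toList_slice, PySem.Chars.slice_eq_listSlice,
          PySem.List.slice_to _ hm0]
      -- A's loop, four explicit steps
      show List.foldl aStep text0 pvM = PySem.Str.rstrip (PySem.Str.slice text0 none (some m))
      apply String.ext
      rw [hBval]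
      simp only [pvM, List.foldl_cons, List.foldl_nil]
      have ht0 : text0.toList = s.take s.length := by rw [List.take_length]
      have hGood := stepGood s
      have hAlive := stepAlive s hPre' mk
      have hK := stepK s mk hmk mstar hKocc hmin
      have hms : mstar ≤ s.length := by omega
      simp only [pvM, List.mem_cons, List.not_mem_nil, or_false] at hmk
      rcases hmk with rfl | rfl | rfl | rfl
      · -- mk = "REFLECTION_PASSED": the first step cuts at mstar
        have h1 := hK text0 s.length ht0 hbound le_rfl
        have h2 := hGood "EVAL_SCORE" (by decide) mstar hms hmin _ h1
        have h3 := hGood "EVALUATION SUMMARY" (by decide) mstar hms hmin _ h2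
        exact hGood "REFLECTION SUMMARY" (by decide) mstar hms hmin _ h3
      · -- mk = "EVAL_SCORE"
        rcases hAlive "REFLECTION_PASSED" (by decide) (by decide) mstar hKocc hmkne hmin
            text0 s.length ht0 hbound le_rfl with ⟨n1, h1, hb1, hn1⟩ | h1
        · have h2 := hK _ n1 h1 hb1 hn1
          have h3 := hGood "EVALUATION SUMMARY" (by decide) mstar hms hmin _ h2
          exact hGood "REFLECTION SUMMARY" (by decide) mstar hms hmin _ h3
        · have h2 := hGood "EVAL_SCORE" (by decide) mstar hms hmin _ h1
          have h3 := hGood "EVALUATION SUMMARY" (by decide) mstar hms hmin _ h2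
          exact hGood "REFLECTION SUMMARY" (by decide) mstar hms hmin _ h3
      · -- mk = "EVALUATION SUMMARY"
        rcases hAlive "REFLECTION_PASSED" (by decide) (by decide) mstar hKocc hmkne hmin
            text0 s.length ht0 hbound le_rfl with ⟨n1, h1, hb1, hn1⟩ | h1
        · rcases hAlive "EVAL_SCORE" (by decide) (by decide) mstar hKocc hmkne hmin
              _ n1 h1 hb1 hn1 with ⟨n2, h2, hb2, hn2⟩ | h2
          · have h3 := hK _ n2 h2 hb2 hn2
            exact hGood "REFLECTION SUMMARY" (by decide) mstar hms hmin _ h3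
          · have h3 := hGood "EVALUATION SUMMARY" (by decide) mstar hms hmin _ h2
            exact hGood "REFLECTION SUMMARY" (by decide) mstar hms hmin _ h3
        · have h2 := hGood "EVAL_SCORE" (by decide) mstar hms hmin _ h1
          have h3 := hGood "EVALUATION SUMMARY" (by decide) mstar hms hmin _ h2
          exact hGood "REFLECTION SUMMARY" (by decide) mstar hms hmin _ h3
      · -- mk = "REFLECTION SUMMARY"
        rcases hAlive "REFLECTION_PASSED" (by decide) (by decide) mstar hKocc hmkne hmin
            text0 s.length ht0 hbound le_rfl with ⟨n1, h1, hb1, hn1⟩ | h1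
        · rcases hAlive "EVAL_SCORE" (by decide) (by decide) mstar hKocc hmkne hmin
              _ n1 h1 hb1 hn1 with ⟨n2, h2, hb2, hn2⟩ | h2
          · rcases hAlive "EVALUATION SUMMARY" (by decide) (by decide) mstar hKocc hmkne hmin
                _ n2 h2 hb2 hn2 with ⟨n3, h3, hb3, hn3⟩ | h3
            · exact hK _ n3 h3 hb3 hn3
            · exact hGood "REFLECTION SUMMARY" (by decide) mstar hms hmin _ h3
          · have h3 := hGood "EVALUATION SUMMARY" (by decide) mstar hms hmin _ h2
            exact hGood "REFLECTION SUMMARY" (by decide) mstar hms hmin _ h3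
        · have h2 := hGood "EVAL_SCORE" (by decide) mstar hms hmin _ h1
          have h3 := hGood "EVALUATION SUMMARY" (by decide) mstar hms hmin _ h2
          exact hGood "REFLECTION SUMMARY" (by decide) mstar hms hmin _ h3
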